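-- pv_equiv track=rewrite | github.com/UR-MJ/UR_IV | utils/prompt_cleaner.py | _convert_underscores
-- ===== SOURCE A (Python) =====
-- def _convert_underscores(text: str) -> str:
--     """밑줄을 공백으로 변환 (태그 내부만)"""
--     # 이스케이프된 밑줄은 유지
--     # 단순히 _ → 공백
--     # 단, \_ 는 유지
--     result = []
--     i = 0
--     while i < len(text):
--         if text[i] == '\\' and i + 1 < len(text) and text[i + 1] == '_':
--             result.append('_')  # \_ → _
--             i += 2
--         elif text[i] == '_':
--             result.append(' ')
--             i += 1
--         else:
--             result.append(text[i])
--             i += 1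
--     return ''.join(result)
-- ===== SOURCE B (Python) =====
-- def _convert_underscores(text: str) -> str:
--     """밑줄을 공백으로 변환 (태그 내부만)"""
--     return '_'.join(seg.replace('_', ' ') for seg in text.split('\\_'))
-- ===== Notes on version B (the rewrite author's own statement) =====
-- stated objective: idiomatic
-- what changed: Replaces the explicit index/while-loop character scanner with a pipeline of string methods: split on the two-character escape sequence, replace remaining underscores with spaces in each segment, rejoin with a literal underscore.
import Mathlib
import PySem

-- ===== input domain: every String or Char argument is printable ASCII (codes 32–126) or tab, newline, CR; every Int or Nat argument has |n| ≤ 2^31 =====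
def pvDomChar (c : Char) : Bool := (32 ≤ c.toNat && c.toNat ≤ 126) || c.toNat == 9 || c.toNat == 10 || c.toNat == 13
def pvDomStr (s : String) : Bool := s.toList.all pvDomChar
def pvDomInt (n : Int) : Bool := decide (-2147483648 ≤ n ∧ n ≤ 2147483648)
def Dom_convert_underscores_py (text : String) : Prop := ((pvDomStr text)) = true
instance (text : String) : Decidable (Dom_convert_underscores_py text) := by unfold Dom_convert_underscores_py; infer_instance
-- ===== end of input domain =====

-- B replaces A's index/while-loop scanner with an idiomatic split / replace / rejoin pipeline (same cost).

-- ===== PORT A =====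
-- the while-loop over index i, as structural recursion over the remaining characters;
-- the three branches are A's three branches in order ('\'+'_' with lookahead, '_', other)
def convert_underscores_py_go : List Char → List Char
  | [] => []
  | '\\' :: '_' :: rest => '_' :: convert_underscores_py_go rest
  | '_' :: rest => ' ' :: convert_underscores_py_go rest
  | c :: rest => c :: convert_underscores_py_go rest

def convert_underscores_py (text : String) : String :=
  String.ofList (convert_underscores_py_go text.toList)   -- ''.join(result)

-- ===== PORT B =====
-- '_'.join(seg.replace('_', ' ') for seg in text.split('\_'));
-- split? is some-valued since the separator "\_" is nonempty, so getD [] never fires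
def convert_underscores_py_alt (text : String) : String :=
  PySem.Str.join "_"
    (((PySem.Str.split? text "\\_").getD []).map (fun seg => PySem.Str.replace seg "_" " "))

-- ===== PRECONDITION & SPEC =====
def Spec_convert_underscores_py (text : String) (out : String) : Prop := out = convert_underscores_py_alt text
instance (text : String) (out : String) : Decidable (Spec_convert_underscores_py text out) := by unfold Spec_convert_underscores_py; infer_instance

-- ===== CLAIM (what is proved, stated in full; the proofs are below) =====
def Claim_equal_convert_underscores_py : Prop := ∀ (text : String), Dom_convert_underscores_py text → Spec_convert_underscores_py text (convert_underscores_py text)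

-- ===== LEMMAS AND PROOFS =====

def pvSubChar (c : Char) : Char := if c = '_' then ' ' else c

-- structural characterisation of splitting on the two-character separator "\_"
def pvSplitEsc : List Char → List (List Char)
  | [] => [[]]
  | c :: rest =>
    if ['\\', '_'].isPrefixOf (c :: rest) then [] :: pvSplitEsc rest.tail
    else match pvSplitEsc rest with
      | [] => [[c]]
      | h :: t => (c :: h) :: t
termination_by l => l.length
decreasing_by
  all_goals simp [List.length_tail]
  try omega

lemma pvSplitEsc_nil : pvSplitEsc [] = [[]] := by
  rw [pvSplitEsc.eq_def]

lemma pvSplitEsc_cons (c : Char) (rest : List Char) :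
    pvSplitEsc (c :: rest) =
      if ['\\', '_'].isPrefixOf (c :: rest) then [] :: pvSplitEsc rest.tail
      else match pvSplitEsc rest with
        | [] => [[c]]
        | h :: t => (c :: h) :: t := by
  rw [pvSplitEsc.eq_def]

lemma pvSplitEsc_ne_nil (l : List Char) : pvSplitEsc l ≠ [] := by
  match l with
  | [] => rw [pvSplitEsc_nil]; simp
  | c :: rest =>
    rw [pvSplitEsc_cons]
    split
    · simp
    · split <;> simp

lemma pvGoStep_nil (sep : List Char) (fuel : Nat) (cur : List Char) (accs : List (List Char)) :
    PySem.Chars.splitOn.go sep (Nat.succ fuel) [] cur accs = (cur.reverse :: accs).reverse := rfl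

lemma pvGoStep_cons (sep : List Char) (fuel : Nat) (c : Char) (rest cur : List Char)
    (accs : List (List Char)) :
    PySem.Chars.splitOn.go sep (Nat.succ fuel) (c :: rest) cur accs =
      if sep.isPrefixOf (c :: rest) then
        PySem.Chars.splitOn.go sep fuel (List.drop sep.length (c :: rest)) [] (cur.reverse :: accs)
      else PySem.Chars.splitOn.go sep fuel rest (c :: cur) accs := rfl

lemma pvSplitOn_go_spec (fuel : Nat) :
    ∀ (l cur : List Char) (accs : List (List Char)), l.length < fuel →
      PySem.Chars.splitOn.go ['\\', '_'] fuel l cur accs =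
        accs.reverse ++ (match pvSplitEsc l with
          | [] => [cur.reverse]
          | h :: t => (cur.reverse ++ h) :: t) := by
  induction fuel with
  | zero => intro l cur accs h; omega
  | succ fuel ih =>
    intro l cur accs h
    match l with
    | [] =>
      rw [pvGoStep_nil, pvSplitEsc_nil]
      simp
    | c :: rest =>
      rw [pvGoStep_cons, pvSplitEsc_cons]
      by_cases hp : ['\\', '_'].isPrefixOf (c :: rest) = true
      · have hpre : ['\\', '_'] <+: c :: rest := List.isPrefixOf_iff_prefix.mp hp
        obtain ⟨tl, htl⟩ := hpre
        simp only [List.cons_append, List.nil_append] at htl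
        injection htl with h1 h2
        cases h1; cases h2
        rw [if_pos hp, if_pos hp]
        rw [show List.drop (['\\', '_'].length) ('\\' :: '_' :: tl) = tl by simp]
        rw [ih tl [] (cur.reverse :: accs) (by simp at h ⊢; omega)]
        rcases hsp : pvSplitEsc tl with _ | ⟨hh, tt⟩
        · exact absurd hsp (pvSplitEsc_ne_nil tl)
        · simp [List.tail, hsp]
      · rw [if_neg hp, if_neg hp]
        rw [ih rest (c :: cur) accs (by simp at h ⊢; omega)]
        rcases hsp : pvSplitEsc rest with _ | ⟨hh, tt⟩
        · exact absurd hsp (pvSplitEsc_ne_nil rest)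
        · simp

lemma pvSplitOn_eq (l : List Char) :
    PySem.Chars.splitOn l ['\\', '_'] = pvSplitEsc l := by
  rw [PySem.Chars.splitOn]
  rw [pvSplitOn_go_spec (l.length + 1) l [] [] (by omega)]
  rcases hsp : pvSplitEsc l with _ | ⟨hh, tt⟩
  · exact absurd hsp (pvSplitEsc_ne_nil l)
  · simp

lemma pvRepStep_zero (old new l acc : List Char) :
    PySem.Chars.replace.go old new 0 l acc = acc.reverse ++ l := rfl

lemma pvRepStep_nil (old new : List Char) (fuel : Nat) (acc : List Char) :
    PySem.Chars.replace.go old new (Nat.succ fuel) [] acc = acc.reverse := rfl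

lemma pvRepStep_cons (old new : List Char) (fuel : Nat) (c : Char) (t acc : List Char) :
    PySem.Chars.replace.go old new (Nat.succ fuel) (c :: t) acc =
      if old.isPrefixOf (c :: t) then
        PySem.Chars.replace.go old new fuel (List.drop old.length (c :: t)) (new.reverse ++ acc)
      else PySem.Chars.replace.go old new fuel t (c :: acc) := rfl

lemma pvReplace_go_spec (fuel : Nat) :
    ∀ (l acc : List Char), l.length ≤ fuel →
      PySem.Chars.replace.go ['_'] [' '] fuel l acc = acc.reverse ++ l.map pvSubChar := by
  induction fuel with
  | zero =>
    intro l acc h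
    have : l = [] := List.length_eq_zero_iff.mp (Nat.le_zero.mp h)
    subst this
    rw [pvRepStep_zero]
    simp
  | succ fuel ih =>
    intro l acc h
    match l with
    | [] => rw [pvRepStep_nil]; simp
    | c :: t =>
      rw [pvRepStep_cons]
      by_cases hc : c = '_'
      · subst hc
        rw [if_pos (by simp [List.isPrefixOf])]
        rw [ih (List.drop ['_'].length ('_' :: t)) _ (by simp at h ⊢; omega)]
        simp [pvSubChar]
      · rw [if_neg (by simp [List.isPrefixOf]; exact fun hh => hc hh.symm)]
        rw [ih t (c :: acc) (by simp at h ⊢; omega)]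
        simp [pvSubChar, hc]

lemma pvReplace_eq (l : List Char) :
    PySem.Chars.replace l ['_'] [' '] = l.map pvSubChar := by
  rw [PySem.Chars.replace]
  rw [if_neg (by simp)]
  exact pvReplace_go_spec l.length l [] (le_refl _)

lemma pvInter_cons (s : List Char) (t : List (List Char)) (h : List Char) :
    List.intercalate s (h :: t) = h ++ t.flatMap (fun x => s ++ x) := by
  induction t generalizing h with
  | nil => simp [List.intercalate]
  | cons y t' ih =>
    have step : List.intercalate s (h :: y :: t') = h ++ s ++ List.intercalate s (y :: t') := by
      simp [List.intercalate, List.intersperse]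
    rw [step, ih y]
    simp

lemma pvGo_cons (c : Char) (rest : List Char)
    (hp : ¬ (['\\', '_'].isPrefixOf (c :: rest) = true)) :
    convert_underscores_py_go (c :: rest) = pvSubChar c :: convert_underscores_py_go rest := by
  by_cases hc : c = '_'
  · subst hc; simp [convert_underscores_py_go, pvSubChar]
  · by_cases hb : c = '\\'
    · subst hb
      match rest with
      | [] => simp [convert_underscores_py_go, pvSubChar]
      | d :: rest' =>
        have hd : d ≠ '_' := by
          intro hd; subst hd; exact hp (by simp [List.isPrefixOf])
        simp [convert_underscores_py_go, pvSubChar, hd]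
    · match rest with
      | [] => simp [convert_underscores_py_go, pvSubChar, hc]
      | d :: rest' =>
        rw [convert_underscores_py_go.eq_def]
        split <;> simp_all [pvSubChar]

lemma pvMain_aux (n : Nat) :
    ∀ (l : List Char), l.length ≤ n →
      convert_underscores_py_go l =
        (match (pvSplitEsc l).map (List.map pvSubChar) with
          | [] => []
          | h :: t => h ++ t.flatMap (fun x => '_' :: x)) := by
  induction n with
  | zero =>
    intro l h
    have : l = [] := List.length_eq_zero_iff.mp (Nat.le_zero.mp h)
    subst this
    rw [pvSplitEsc_nil]
    simp [convert_underscores_py_go]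
  | succ n ih =>
    intro l h
    match l with
    | [] =>
      rw [pvSplitEsc_nil]
      simp [convert_underscores_py_go]
    | c :: rest =>
      rw [pvSplitEsc_cons]
      by_cases hp : ['\\', '_'].isPrefixOf (c :: rest) = true
      · have hpre : ['\\', '_'] <+: c :: rest := List.isPrefixOf_iff_prefix.mp hp
        obtain ⟨tl, htl⟩ := hpre
        simp only [List.cons_append, List.nil_append] at htl
        injection htl with h1 h2
        cases h1; cases h2
        rw [if_pos hp]
        simp only [List.tail_cons]
        have ihtl := ih tl (by simp at h ⊢; omega)
        rcases hsp : pvSplitEsc tl with _ | ⟨hh, tt⟩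
        · exact absurd hsp (pvSplitEsc_ne_nil tl)
        · rw [hsp] at ihtl
          rw [show convert_underscores_py_go ('\\' :: '_' :: tl) = '_' :: convert_underscores_py_go tl from rfl]
          rw [ihtl]
          simp
      · rw [if_neg hp, pvGo_cons c rest hp]
        have ihr := ih rest (by simp at h ⊢; omega)
        rcases hsp : pvSplitEsc rest with _ | ⟨hh, tt⟩
        · exact absurd hsp (pvSplitEsc_ne_nil rest)
        · rw [hsp] at ihr
          simp only [List.map_cons]
          rw [ihr]
          simp

lemma pvMain (l : List Char) :
    convert_underscores_py_go l =
      (match (pvSplitEsc l).map (List.map pvSubChar) with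
        | [] => []
        | h :: t => h ++ t.flatMap (fun x => '_' :: x)) :=
  pvMain_aux l.length l (le_refl _)

lemma pvMaps (parts : List String) :
    List.map String.toList (List.map (fun seg => PySem.Str.replace seg "_" " ") parts) =
      (List.map String.toList parts).map (List.map pvSubChar) := by
  induction parts with
  | nil => simp
  | cons p parts ih =>
    simp only [List.map_cons, ih]
    congr 1
    rw [PySem.Str.toList_replace]
    rw [show ("_" : String).toList = ['_'] from rfl, show (" " : String).toList = [' '] from rfl]
    exact pvReplace_eq p.toList

-- ===== VERDICT (by name: the statement is the Claim_ definition above) =====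
theorem convert_underscores_py_spec : Claim_equal_convert_underscores_py := by
  intro text _
  unfold Spec_convert_underscores_py
  apply String.toList_inj.mp
  obtain ⟨parts, hval, hb⟩ : ∃ parts, PySem.Str.split? text "\\_" = some parts ∧
      List.map String.toList parts = PySem.Chars.splitOn text.toList ['\\', '_'] := by
    have hbr := PySem.Str.split?_map text "\\_"
    rw [show ("\\_" : String).toList = ['\\', '_'] from rfl] at hbr
    rw [PySem.Chars.split?, if_neg (by simp)] at hbr
    rcases hv : PySem.Str.split? text "\\_" with _ | parts
    · rw [hv] at hbr; simp at hbr
    · rw [hv] at hbr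
      simp only [Option.map_some, Option.some.injEq] at hbr
      exact ⟨parts, rfl, hbr⟩
  rw [convert_underscores_py, String.toList_ofList, convert_underscores_py_alt, hval]
  simp only [Option.getD_some]
  rw [PySem.Str.toList_join]
  rw [show ("_" : String).toList = ['_'] from rfl]
  rw [show List.map String.toList (List.map (fun seg => PySem.Str.replace seg "_" " ") parts) =
        (List.map String.toList parts).map (List.map pvSubChar) from pvMaps parts]
  rw [hb, pvSplitOn_eq]
  rw [PySem.Chars.join]
  rw [pvMain]
  rcases hsp : pvSplitEsc text.toList with _ | ⟨hh, tt⟩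
  · exact absurd hsp (pvSplitEsc_ne_nil _)
  · simp only [List.map_cons]
    rw [pvInter_cons]
    simp
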